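-- pv_equiv track=rewrite | github.com/isak148/Bachelor_HVL | VL6180X/examples/bachelor_VL6180X_test1.py | tell_signalskifter
-- ===== SOURCE A (Python) =====
-- def tell_signalskifter(data):
--     count = 0
--     current_sign = None
--     streak = 0
--     ready_for_switch = False
--
--     for value in data:
--         # Nullverdier hopper vi over uten å påvirke streaken
--         if value == 0:
--             continue
--
--         sign = 1 if value > 0 else -1
--
--         if sign == current_sign:
--             streak += 1
--         else:
--             if streak >= 5:
--                 ready_for_switch = True
--             else:
--                 ready_for_switch = False
--
--             if ready_for_switch and sign != current_sign:
--                 count += 1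
--                 ready_for_switch = False
--                 streak = 1  # start ny streak
--             else:
--                 streak = 1
--
--         current_sign = sign
--
--     return count
-- ===== SOURCE B (Python) =====
-- def tell_signalskifter(data):
--     # Two-pass run-length decomposition: map non-zero values to signs, group
--     # consecutive equal signs into run lengths, then count every run except the
--     # last whose length is at least 5 (each such run ends in a counted switch).
--     signs = [1 if v > 0 else -1 for v in data if v != 0]
--     runs = []
--     for s in signs:
--         if runs and runs[-1][0] == s:
--             runs[-1][1] += 1
--         else:
--             runs.append([s, 1])
--     return sum(1 for _, k in runs[:-1] if k >= 5)
-- ===== Notes on version B (the rewrite author's own statement) =====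
-- stated objective: simpler
-- what changed: Replaces A's single stateful loop (current_sign/streak/ready_for_switch flags) by a pipeline: map non-zero values to signs, group consecutive equal signs into a run-length list, then count the runs before the last whose length is at least 5.
import Mathlib
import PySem

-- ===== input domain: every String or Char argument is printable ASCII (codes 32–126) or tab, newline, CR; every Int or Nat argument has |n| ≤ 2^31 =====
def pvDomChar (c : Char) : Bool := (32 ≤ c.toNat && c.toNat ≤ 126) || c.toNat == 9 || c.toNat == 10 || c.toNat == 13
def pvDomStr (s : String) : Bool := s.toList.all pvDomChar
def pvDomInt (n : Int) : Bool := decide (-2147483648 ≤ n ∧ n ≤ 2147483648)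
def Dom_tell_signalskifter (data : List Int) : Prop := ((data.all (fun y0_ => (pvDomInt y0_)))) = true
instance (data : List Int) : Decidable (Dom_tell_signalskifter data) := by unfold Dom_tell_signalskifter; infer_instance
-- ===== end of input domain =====

-- B re-decomposes A's stateful single loop as: signs → run lengths → count of non-final runs ≥ 5 (objective: simpler).

-- ===== PORT A =====
-- state: (count, current_sign, streak, ready_for_switch)
def tellStepA (st : Int × Option Int × Int × Bool) (value : Int) : Int × Option Int × Int × Bool :=
  if value = 0 then st
  else
    let sign : Int := if value > 0 then 1 else -1
    if some sign = st.2.1 then (st.1, st.2.1, st.2.2.1 + 1, st.2.2.2)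
    else
      let ready : Bool := decide (st.2.2.1 ≥ 5)
      if ready = true ∧ some sign ≠ st.2.1 then (st.1 + 1, some sign, 1, false)
      else (st.1, some sign, 1, ready)

def tell_signalskifter (data : List Int) : Int :=
  (data.foldl tellStepA (0, none, 0, false)).1

-- ===== PORT B =====
-- signs = [1 if v > 0 else -1 for v in data if v != 0]
def pvSigns (data : List Int) : List Int :=
  (data.filter (fun v => decide (v ≠ 0))).map (fun v => if v > 0 then (1 : Int) else -1)

-- Python mutates runs[-1] / appends at the end; ported with the runs list kept
-- reversed (current run at the head), reversed once after the fold.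
def runStep (runs : List (Int × Int)) (s : Int) : List (Int × Int) :=
  match runs with
  | (ps, k) :: rest => if ps = s then (ps, k + 1) :: rest else (s, 1) :: (ps, k) :: rest
  | [] => [(s, 1)]

def tell_signalskifter_alt (data : List Int) : Int :=
  let signs := pvSigns data
  let runs := (signs.foldl runStep []).reverse
  ((runs.dropLast.filter (fun p => decide (p.2 ≥ 5))).length : Int)

-- ===== PRECONDITION & SPEC =====
def Spec_tell_signalskifter (data : List Int) (out : Int) : Prop := out = tell_signalskifter_alt data
instance (data : List Int) (out : Int) : Decidable (Spec_tell_signalskifter data out) := by unfold Spec_tell_signalskifter; infer_instance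

-- ===== CLAIM (what is proved, stated in full; the proofs are below) =====
def Claim_equal_tell_signalskifter : Prop := ∀ (data : List Int), Dom_tell_signalskifter data → Spec_tell_signalskifter data (tell_signalskifter data)

-- ===== LEMMAS AND PROOFS =====

-- number of runs with length ≥ 5 in a (reversed) run list
def cntRuns (rs : List (Int × Int)) : Int :=
  ((rs.filter (fun p => decide (p.2 ≥ 5))).length : Int)

theorem foldA_signs (data : List Int) :
    ∀ st, data.foldl tellStepA st = (pvSigns data).foldl tellStepA st := by
  induction data with
  | nil => intro st; rfl
  | cons v vs ih =>
    intro st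
    by_cases h0 : v = 0
    · subst h0
      have : pvSigns ((0 : Int) :: vs) = pvSigns vs := by simp [pvSigns]
      rw [this]
      simp only [List.foldl_cons]
      rw [show tellStepA st 0 = st from by simp [tellStepA]]
      exact ih st
    · have hsg : pvSigns (v :: vs) = (if v > 0 then (1 : Int) else -1) :: pvSigns vs := by
        simp [pvSigns, h0]
      rw [hsg]
      simp only [List.foldl_cons]
      have hstep : tellStepA st v = tellStepA st (if v > 0 then (1 : Int) else -1) := by
        by_cases hv : v > 0 <;> simp [tellStepA, h0, hv]
      rw [hstep]
      exact ih _

theorem signs_pm (data : List Int) : ∀ x ∈ pvSigns data, x = 1 ∨ x = -1 := by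
  intro x hx
  simp only [pvSigns, List.mem_map, List.mem_filter] at hx
  obtain ⟨v, _, hv⟩ := hx
  by_cases h : v > 0 <;> simp [h] at hv <;> omega

theorem invariant (l : List Int) (hpm : ∀ x ∈ l, x = 1 ∨ x = -1) :
    ∀ (c s k : Int) (r : Bool) (rest : List (Int × Int)),
      (l.foldl tellStepA (c, some s, k, r)).1 + cntRuns rest
        = c + cntRuns ((l.foldl runStep ((s, k) :: rest)).tail) := by
  induction l with
  | nil => intro c s k r rest; simp [cntRuns]
  | cons x xs ih =>
    intro c s k r rest
    have hx : x = 1 ∨ x = -1 := hpm x (by simp)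
    have hxs : ∀ y ∈ xs, y = 1 ∨ y = -1 := fun y hy => hpm y (by simp [hy])
    by_cases hxe : x = s
    · subst hxe
      have h1 : tellStepA (c, some x, k, r) x = (c, some x, k + 1, r) := by
        rcases hx with rfl | rfl <;> norm_num [tellStepA]
      have h2 : runStep ((x, k) :: rest) x = (x, k + 1) :: rest := by simp [runStep]
      simp only [List.foldl_cons, h1, h2]
      exact ih hxs c x (k + 1) r rest
    · have h1 : tellStepA (c, some s, k, r) x
          = if k ≥ 5 then (c + 1, some x, 1, false) else (c, some x, 1, decide (k ≥ 5)) := by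
        have hne : ¬ (x = s) := hxe
        by_cases h5 : k ≥ 5 <;> rcases hx with rfl | rfl <;> simp [tellStepA, h5, hne]
      have h2 : runStep ((s, k) :: rest) x = (x, 1) :: (s, k) :: rest := by
        simp [runStep, Ne.symm hxe]
      have hcnt : cntRuns ((s, k) :: rest) = cntRuns rest + (if k ≥ 5 then 1 else 0) := by
        by_cases h5 : k ≥ 5 <;> simp [cntRuns, h5]
      simp only [List.foldl_cons, h1, h2]
      by_cases h5 : k ≥ 5
      · simp only [h5, if_true]
        have := ih hxs (c + 1) x 1 false ((s, k) :: rest)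
        rw [hcnt] at this
        simp only [h5, if_true] at this
        omega
      · simp only [h5, if_false]
        have := ih hxs c x 1 (decide (k ≥ 5)) ((s, k) :: rest)
        rw [hcnt] at this
        simp only [h5, if_false] at this
        omega

theorem cnt_rev_dropLast (l : List (Int × Int)) :
    cntRuns (l.reverse.dropLast) = cntRuns l.tail := by
  rw [List.dropLast_reverse]
  simp [cntRuns, List.filter_reverse]

-- ===== VERDICT (by name: the statement is the Claim_ definition above) =====
theorem tell_signalskifter_spec : Claim_equal_tell_signalskifter := by
  intro data _
  unfold Spec_tell_signalskifter tell_signalskifter tell_signalskifter_alt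
  rw [foldA_signs]
  have hpm := signs_pm data
  rcases hsg : pvSigns data with _ | ⟨x, xs⟩
  · simp
  · rw [hsg] at hpm
    have hx : x = 1 ∨ x = -1 := hpm x (by simp)
    have hxs : ∀ y ∈ xs, y = 1 ∨ y = -1 := fun y hy => hpm y (by simp [hy])
    have h0 : tellStepA (0, none, 0, false) x = (0, some x, 1, false) := by
      rcases hx with rfl | rfl <;> norm_num [tellStepA] <;> intro h <;> exact absurd h (by simp)
    have h0' : runStep [] x = [(x, 1)] := by simp [runStep]
    simp only [List.foldl_cons, h0, h0']
    have hinv := invariant xs hxs 0 x 1 false []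
    have hrev := cnt_rev_dropLast (xs.foldl runStep [(x, 1)])
    simp only [cntRuns] at hinv hrev
    simp only [List.filter_nil, List.length_nil] at hinv
    omega
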